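-- pv_equiv track=rewrite | github.com/ST3LL/Projet_PTS-DIA_13 | utils.py | calc_dim
-- ===== SOURCE A (Python) =====
-- from typing import List, Optional, Tuple, FrozenSet, Callable, Dict, Set
--
-- Region_map = List[List[Optional[int]]]
--
-- def calc_dim(region_map: Region_map) -> int:
--     d_k = {}
--     for row in region_map:
--         for k in row:
--             d_k[k] = d_k[k] + 1 if k in d_k else 1
--     if None in d_k:
--         del d_k[None]
--     s_k = set(d_k.values())
--     assert len(s_k) == 1
--     return s_k.pop()
-- ===== SOURCE B (Python) =====
-- from itertools import groupby
--
-- def calc_dim(region_map):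
--     labels = sorted(k for row in region_map for k in row if k is not None)
--     counts = {sum(1 for _ in g) for _, g in groupby(labels)}
--     assert len(counts) == 1
--     return counts.pop()
-- ===== Notes on version B (the rewrite author's own statement) =====
-- stated objective: alternative
-- what changed: Replaces the dict-based counting pass plus None-key deletion by flattening the non-None labels, sorting them, and taking the run lengths of consecutive equal labels via itertools.groupby as the set of counts.
import Mathlib
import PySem

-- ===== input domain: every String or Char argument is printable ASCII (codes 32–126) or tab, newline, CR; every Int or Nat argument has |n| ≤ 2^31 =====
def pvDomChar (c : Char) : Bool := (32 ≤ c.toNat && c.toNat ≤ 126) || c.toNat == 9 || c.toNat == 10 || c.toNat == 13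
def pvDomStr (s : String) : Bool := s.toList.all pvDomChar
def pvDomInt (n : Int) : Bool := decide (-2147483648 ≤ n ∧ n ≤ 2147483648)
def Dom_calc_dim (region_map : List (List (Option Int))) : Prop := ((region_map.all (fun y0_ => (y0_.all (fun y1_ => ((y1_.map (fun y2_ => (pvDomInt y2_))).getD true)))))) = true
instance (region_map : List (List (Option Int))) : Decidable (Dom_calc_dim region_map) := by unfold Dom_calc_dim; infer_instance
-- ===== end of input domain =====

-- B replaces A's dict-counting pass (+ None-key deletion) by sort + run lengths of
-- consecutive equal labels (itertools.groupby); alternative algorithm, same values,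
-- both raise AssertionError outside Pre_ (empty/all-None grid or unequal counts).

-- ===== PORT A =====
-- d_k[k] = d_k[k] + 1 if k in d_k else 1, over all cells (None included)
def calc_dim (region_map : List (List (Option Int))) : Int :=
  let d_k : PySem.Dict (Option Int) Int :=
    region_map.foldl (fun d row =>
      row.foldl (fun d k => d.insert k (if d.contains k then d.getD k 0 + 1 else 1)) d)
      PySem.Dict.empty
  let d_k2 := if d_k.contains none then d_k.erase none else d_k   -- if None in d_k: del d_k[None]
  let s_k : PySem.Set Int := PySem.Set.ofList d_k2.values         -- set(d_k.values())
  -- assert len(s_k) == 1; return s_k.pop()  (AssertionError outside Pre_, excluded there)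
  match s_k with
  | [x] => x
  | _ => 0

-- ===== PORT B =====
-- hand port of itertools.groupby run lengths: `[sum(1 for _ in g) for _, g in groupby(s)]`
-- on a list s = cur :: rest with cnt the length of the current run so far; exact for any list
def runLens (cur : Int) (cnt : Int) : List Int → List Int
  | [] => [cnt]
  | y :: ys => if y == cur then runLens cur (cnt + 1) ys else cnt :: runLens y 1 ys

def calc_dim_alt (region_map : List (List (Option Int))) : Int :=
  let labels : List Int :=
    PySem.List.sorted (region_map.flatMap (fun row => row.filterMap (fun k => k))) (fun x => x) false
  let counts : PySem.Set Int :=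
    PySem.Set.ofList (match labels with
      | [] => []
      | x :: xs => runLens x 1 xs)
  -- assert len(counts) == 1; return counts.pop() (pop of the singleton = its head)
  if counts.length == 1 then counts.headI else 0

-- ===== PRECONDITION & SPEC =====
-- Pre_ excludes exactly the inputs where BOTH programs raise AssertionError:
-- grids with no non-None label, or whose non-None labels do not all occur equally often.
def Pre_calc_dim (region_map : List (List (Option Int))) : Prop :=
  region_map.flatMap (fun row => row.filterMap (fun k => k)) ≠ [] ∧
  ∀ x ∈ region_map.flatMap (fun row => row.filterMap (fun k => k)),
    ∀ y ∈ region_map.flatMap (fun row => row.filterMap (fun k => k)),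
      (region_map.flatMap (fun row => row.filterMap (fun k => k))).count x =
      (region_map.flatMap (fun row => row.filterMap (fun k => k))).count y

instance (region_map : List (List (Option Int))) : Decidable (Pre_calc_dim region_map) := by
  unfold Pre_calc_dim; infer_instance

def pvWitness_calc_dim : List (List (Option Int)) := [[some 1, none, some 2], [some 2, some 1]]

def Spec_calc_dim (region_map : List (List (Option Int))) (out : Int) : Prop := out = calc_dim_alt region_map
instance (region_map : List (List (Option Int))) (out : Int) : Decidable (Spec_calc_dim region_map out) := by unfold Spec_calc_dim; infer_instance

-- ===== CLAIM (what is proved, stated in full; the proofs are below) =====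
def Claim_equal_calc_dim : Prop := ∀ (region_map : List (List (Option Int))), Dom_calc_dim region_map → Pre_calc_dim region_map → Spec_calc_dim region_map (calc_dim region_map)

-- ===== LEMMAS AND PROOFS =====

-- a nonempty Nodup list all of whose members equal c is [c]
lemma nodup_const_eq_singleton {l : List Int} {c : Int} (hnd : l.Nodup) (hne : l ≠ [])
    (h : ∀ y ∈ l, y = c) : l = [c] := by
  match l, hnd, hne with
  | x :: t, hnd, _ =>
    have hx : x = c := h x (by simp)
    have ht : t = [] := by
      cases t with
      | nil => rfl
      | cons z zs =>
        exfalso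
        have hz : z = c := h z (by simp)
        have : x ∉ (z :: zs) := (List.nodup_cons.mp hnd).1
        exact this (by simp [hx, hz])
    simp [hx, ht]

lemma set_ofList_const {xs : List Int} {c : Int} (hne : xs ≠ []) (h : ∀ y ∈ xs, y = c) :
    PySem.Set.ofList xs = [c] := by
  apply nodup_const_eq_singleton (PySem.Set.nodup_ofList xs)
  · intro hnil
    match xs, hne with
    | x :: t, _ =>
      have : x ∈ PySem.Set.ofList (x :: t) := by
        rw [PySem.Set.mem_ofList]; simp
      rw [hnil] at this; simp at this
  · intro y hy
    exact h y ((PySem.Set.mem_ofList _ _).mp hy)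

-- counting some x among option cells = counting x among the filterMapped labels
lemma count_some_eq_count_filterMap (cells : List (Option Int)) (x : Int) :
    cells.count (some x) = (cells.filterMap (fun k => k)).count x := by
  induction cells with
  | nil => rfl
  | cons o t ih =>
    cases o with
    | none => simpa using ih
    | some y =>
      by_cases hxy : y = x
      · subst hxy; simp [List.count_cons, ih]
      · simp [hxy, ih]

-- the flatMap of per-row filterMaps is the filterMap of the flattened grid
lemma flatMap_filterMap_eq (rm : List (List (Option Int))) :
    rm.flatMap (fun row => row.filterMap (fun k => k)) = rm.flatten.filterMap (fun k => k) := by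
  induction rm with
  | nil => rfl
  | cons r t ih => simp [List.flatMap_cons, List.flatten_cons, List.filterMap_append, ih]

-- A's counting loop is Counter(cells)
lemma loop_eq_counter (rm : List (List (Option Int))) :
    rm.foldl (fun d row =>
      row.foldl (fun d k => d.insert k (if d.contains k then d.getD k 0 + 1 else 1)) d)
      PySem.Dict.empty = PySem.Dict.counter rm.flatten := by
  have hstep : ∀ (d : PySem.Dict (Option Int) Int) (k : Option Int),
      d.insert k (if d.contains k then d.getD k 0 + 1 else 1) = d.insert k (d.getD k 0 + 1) := by
    intro d k
    by_cases hc : d.contains k = true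
    · simp [hc]
    · have hc' : d.contains k = false := by revert hc; cases d.contains k <;> simp
      rw [PySem.Dict.getD_of_not_contains (h := hc')]
      simp [hc']
  have h1 : rm.foldl (fun d row =>
      row.foldl (fun d k => d.insert k (if d.contains k then d.getD k 0 + 1 else 1)) d)
      PySem.Dict.empty
      = rm.flatten.foldl (fun d k => d.insert k (if d.contains k then d.getD k 0 + 1 else 1))
        (PySem.Dict.empty : PySem.Dict (Option Int) Int) := List.foldl_flatten.symm
  have h2 : rm.flatten.foldl (fun d k => d.insert k (if d.contains k then d.getD k 0 + 1 else 1))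
      (PySem.Dict.empty : PySem.Dict (Option Int) Int)
      = rm.flatten.foldl (fun d k => d.insert k (d.getD k 0 + 1))
        (PySem.Dict.empty : PySem.Dict (Option Int) Int) :=
    PySem.List.foldl_congr_mem _ _ _ _ (fun acc x _ => hstep acc x)
  exact (h1.trans h2).trans (PySem.Dict.foldl_insert_getD_add_one_eq_counter _)

-- erasing an absent key is the identity
lemma erase_of_not_contains {κ ν : Type} [BEq κ] [LawfulBEq κ] (d : PySem.Dict κ ν) (k : κ)
    (h : d.contains k = false) : d.erase k = d := by
  have hmem : ∀ p ∈ d.items, (!p.1 == k) = true := by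
    intro p hp
    have hk : p.1 ∈ d.keys := by
      simp only [PySem.Dict.keys]; exact List.mem_map_of_mem hp
    by_cases he : p.1 = k
    · exfalso
      have := (PySem.Dict.contains_iff_mem_keys d k).mpr (he ▸ hk)
      rw [h] at this; cases this
    · simp [he]
  show PySem.Dict.mk (d.items.filter _) = d
  rw [List.filter_eq_self.mpr hmem]

-- run lengths in a sorted tail are counts
lemma runLens_spec : ∀ (s : List Int) (cur cnt : Int), s.Pairwise (· ≤ ·) →
    (∀ y ∈ s, cur ≤ y) →
    ∀ n ∈ runLens cur cnt s,
      n = cnt + (s.count cur : Int) ∨ ∃ x ∈ s, x ≠ cur ∧ n = (s.count x : Int) := by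
  intro s
  induction s with
  | nil =>
    intro cur cnt _ _ n hn
    simp [runLens] at hn
    left; simp [hn]
  | cons y ys ih =>
    intro cur cnt hp hlb n hn
    have hp' : ys.Pairwise (· ≤ ·) := (List.pairwise_cons.mp hp).2
    have hyb : ∀ z ∈ ys, y ≤ z := (List.pairwise_cons.mp hp).1
    by_cases hy : y = cur
    · subst hy
      rw [runLens, if_pos (by simp)] at hn
      rcases ih y (cnt + 1) hp' hyb n hn with h | ⟨x, hx, hxy, hxn⟩
      · left
        rw [h, List.count_cons_self]
        push_cast; ring
      · right
        refine ⟨x, by simp [hx], hxy, ?_⟩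
        rw [hxn, List.count_cons_of_ne (Ne.symm hxy)]
    · have hlt : cur < y := lt_of_le_of_ne (hlb y (by simp)) (fun h => hy h.symm)
      rw [runLens, if_neg (by simp [hy])] at hn
      rcases List.mem_cons.mp hn with h | h
      · left
        have hc : (y :: ys).count cur = 0 := by
          rw [List.count_eq_zero]
          intro hcur
          rcases List.mem_cons.mp hcur with h' | h'
          · exact hy h'.symm
          · have := hyb cur h'; omega
        rw [hc, h]; simp
      · rcases ih y 1 hp' hyb n h with h' | ⟨x, hx, hxy, hxn⟩
        · right
          refine ⟨y, by simp, by omega, ?_⟩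
          rw [h', List.count_cons_self]; push_cast; ring
        · right
          have hylex : y ≤ x := hyb x hx
          refine ⟨x, by simp [hx], by omega, ?_⟩
          rw [hxn, List.count_cons_of_ne (Ne.symm hxy)]

lemma runLens_ne_nil : ∀ (s : List Int) (cur cnt : Int), runLens cur cnt s ≠ [] := by
  intro s
  induction s with
  | nil => intro cur cnt; simp [runLens]
  | cons y ys ih =>
    intro cur cnt
    rw [runLens]
    by_cases h : (y == cur) = true
    · rw [if_pos h]; exact ih cur (cnt + 1)
    · rw [if_neg h]; simp

-- the A-side set is [c] where c is the common count of the non-None labels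
lemma calc_dim_eval (rm : List (List (Option Int))) (c : Int)
    (hne : rm.flatMap (fun row => row.filterMap (fun k => k)) ≠ [])
    (hc : ∀ x ∈ rm.flatMap (fun row => row.filterMap (fun k => k)),
      (((rm.flatMap (fun row => row.filterMap (fun k => k))).count x : Nat) : Int) = c) :
    calc_dim rm = c := by
  have hflat := flatMap_filterMap_eq rm
  have hvals : (if (PySem.Dict.counter rm.flatten).contains none
        then (PySem.Dict.counter rm.flatten).erase none else PySem.Dict.counter rm.flatten).values
      = ((PySem.Set.ofList rm.flatten).filter (fun k => !(k == none))).map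
          (fun k => ((rm.flatten.count k : Nat) : Int)) := by
    have herase : ((PySem.Dict.counter rm.flatten).erase none).values
        = ((PySem.Set.ofList rm.flatten).filter (fun k => !(k == none))).map
            (fun k => ((rm.flatten.count k : Nat) : Int)) := by
      show (PySem.Dict.mk (((PySem.Dict.counter rm.flatten).items).filter _)).values = _
      rw [PySem.Dict.items_counter]
      simp only [PySem.Dict.values, List.filter_map, List.map_map]
      rfl
    by_cases hcont : (PySem.Dict.counter rm.flatten).contains none = true
    · rw [if_pos hcont]; exact herase
    · have hcont' : (PySem.Dict.counter rm.flatten).contains none = false := by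
        revert hcont; cases (PySem.Dict.counter rm.flatten).contains none <;> simp
      rw [if_neg (by simp [hcont']), ← erase_of_not_contains _ _ hcont']
      exact herase
  have hmem : ∀ v ∈ ((PySem.Set.ofList rm.flatten).filter (fun k => !(k == none))).map
          (fun k => ((rm.flatten.count k : Nat) : Int)), v = c := by
    intro v hv
    rcases List.mem_map.mp hv with ⟨k, hk, hkv⟩
    have hk1 : k ∈ rm.flatten := (PySem.Set.mem_ofList _ _).mp (List.mem_of_mem_filter hk)
    have hk2 : (!(k == none)) = true := (List.mem_filter.mp hk).2
    match k, hk1, hk2, hkv with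
    | some x, hk1, _, hkv =>
      have hx : x ∈ rm.flatMap (fun row => row.filterMap (fun k => k)) := by
        rw [hflat]
        exact List.mem_filterMap.mpr ⟨some x, hk1, rfl⟩
      rw [← hkv, count_some_eq_count_filterMap, ← hflat]
      exact hc x hx
  have hvne : ((PySem.Set.ofList rm.flatten).filter (fun k => !(k == none))).map
          (fun k => ((rm.flatten.count k : Nat) : Int)) ≠ [] := by
    rcases List.exists_mem_of_ne_nil _ hne with ⟨x, hx⟩
    rw [hflat] at hx
    rcases List.mem_filterMap.mp hx with ⟨o, ho, hox⟩
    match o, ho, hox with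
    | some x, ho, _ =>
      have hmf : (some x) ∈ (PySem.Set.ofList rm.flatten).filter (fun k => !(k == none)) :=
        List.mem_filter.mpr ⟨(PySem.Set.mem_ofList _ _).mpr ho, by simp⟩
      intro hcon
      rw [List.map_eq_nil_iff] at hcon
      rw [hcon] at hmf; simp at hmf
  have hset : PySem.Set.ofList (((PySem.Set.ofList rm.flatten).filter (fun k => !(k == none))).map
          (fun k => ((rm.flatten.count k : Nat) : Int))) = [c] := set_ofList_const hvne hmem
  have hcd : calc_dim rm = (match PySem.Set.ofList ((if (PySem.Dict.counter rm.flatten).contains none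
        then (PySem.Dict.counter rm.flatten).erase none else PySem.Dict.counter rm.flatten).values) with
      | [x] => x | _ => (0 : Int)) := by
    simp only [calc_dim]
    rw [loop_eq_counter]
  rw [hcd, hvals, hset]

-- the B-side set is [c] as well
lemma calc_dim_alt_eval (rm : List (List (Option Int))) (c : Int)
    (hne : rm.flatMap (fun row => row.filterMap (fun k => k)) ≠ [])
    (hc : ∀ x ∈ rm.flatMap (fun row => row.filterMap (fun k => k)),
      (((rm.flatMap (fun row => row.filterMap (fun k => k))).count x : Nat) : Int) = c) :
    calc_dim_alt rm = c := by
  have hsne : PySem.List.sorted (rm.flatMap (fun row => row.filterMap (fun k => k)))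
      (fun x => x) false ≠ [] := by
    rw [Ne, PySem.List.sorted_eq_nil_iff]; exact hne
  have hperm : (PySem.List.sorted (rm.flatMap (fun row => row.filterMap (fun k => k)))
      (fun x => x) false).Perm (rm.flatMap (fun row => row.filterMap (fun k => k))) :=
    PySem.List.sorted_perm _ _ _
  have hpw : (PySem.List.sorted (rm.flatMap (fun row => row.filterMap (fun k => k)))
      (fun x => x) false).Pairwise (· ≤ ·) := PySem.List.sorted_pairwise _ _
  obtain ⟨h, t, hs⟩ := List.exists_cons_of_ne_nil hsne
  rw [hs] at hperm hpw
  have hp' : t.Pairwise (· ≤ ·) := (List.pairwise_cons.mp hpw).2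
  have hlb : ∀ y ∈ t, h ≤ y := (List.pairwise_cons.mp hpw).1
  have hrmem : ∀ n ∈ runLens h 1 t, n = c := by
    intro n hn
    have hcount : ∀ z ∈ (h :: t), ((h :: t).count z : Int) = c := by
      intro z hz
      rw [hperm.count_eq]
      exact hc z (hperm.mem_iff.mp hz)
    rcases runLens_spec t h 1 hp' hlb n hn with h' | ⟨x, hx, hxh, hxn⟩
    · rw [h']
      have := hcount h (by simp)
      rw [List.count_cons_self] at this
      push_cast at this ⊢
      omega
    · rw [hxn, ← List.count_cons_of_ne (Ne.symm hxh)]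
      exact hcount x (by simp [hx])
  have hset : PySem.Set.ofList (runLens h 1 t) = [c] :=
    set_ofList_const (runLens_ne_nil t h 1) hrmem
  have hcd : calc_dim_alt rm = (if (PySem.Set.ofList (runLens h 1 t)).length == 1
      then (PySem.Set.ofList (runLens h 1 t)).headI else 0) := by
    simp only [calc_dim_alt]
    rw [hs]
  rw [hcd, hset]
  simp

-- ===== VERDICT (by name: the statement is the Claim_ definition above) =====
theorem calc_dim_spec : Claim_equal_calc_dim := by
  intro rm _ hpre
  unfold Spec_calc_dim
  rcases hpre with ⟨hne, huni⟩
  have hhead : (rm.flatMap (fun row => row.filterMap (fun k => k))).head hne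
      ∈ rm.flatMap (fun row => row.filterMap (fun k => k)) := List.head_mem hne
  have hc : ∀ x ∈ rm.flatMap (fun row => row.filterMap (fun k => k)),
      (((rm.flatMap (fun row => row.filterMap (fun k => k))).count x : Nat) : Int)
      = (((rm.flatMap (fun row => row.filterMap (fun k => k))).count
          ((rm.flatMap (fun row => row.filterMap (fun k => k))).head hne) : Nat) : Int) := by
    intro x hx
    rw [huni x hx _ hhead]
  rw [calc_dim_eval rm _ hne hc, calc_dim_alt_eval rm _ hne hc]
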